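-- pv_equiv track=rewrite | github.com/achoruzy/ProjectEuler | 0062_Cubic_permutations.py | compare_for_smallest_permutations
-- ===== SOURCE A (Python) =====
-- def compare_for_smallest_permutations(cubes: list, permuts: int) -> list:
--     '''Checks for number of permutations along list
--
--     params:
--         cubes: list -> list of cubes of equal lenght
--         permuts: int -> how many permutations has to be found
--
--     returns:
--         list of found permutations if len(result) == permuts
--         empty list if else
--     '''
--     for i in cubes:
--         result_for_iter = []
--         i_str = str(i)
--
--         cubes_in_iter = cubes.copy()
--         cubes_in_iter.remove(i)
--
--         for j in cubes_in_iter: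
--             j_str = str(j)
--
--             if sorted(i_str) == sorted(j_str):
--
--                 if len(result_for_iter) == 0:
--                     result_for_iter.append(i)
--
--                 result_for_iter.append(j)
--
--         if len(result_for_iter) == permuts:
--             # First found -> smallest
--             return result_for_iter
--
--     return []
-- ===== SOURCE B (Python) =====
-- def compare_for_smallest_permutations(cubes: list, permuts: int) -> list:
--     '''One pass builds a digit-signature counter; the answer is the whole
--     signature group (in original order) of the first element whose group
--     size equals permuts.'''
--     counts = {}
--     for c in cubes:
--         k = ''.join(sorted(str(c)))
--         counts[k] = counts.get(k, 0) + 1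
--     if permuts < 2:
--         return []
--     for i in cubes:
--         k = ''.join(sorted(str(i)))
--         if counts[k] == permuts:
--             return [j for j in cubes if ''.join(sorted(str(j))) == k]
--     return []
-- ===== Notes on version B (the rewrite author's own statement) =====
-- stated objective: faster
-- what changed: Instead of rescanning the whole list for matches of each element, B builds a sorted-digit-signature counter in one pass and returns the full signature group of the first element whose group size equals permuts.
import Mathlib
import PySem

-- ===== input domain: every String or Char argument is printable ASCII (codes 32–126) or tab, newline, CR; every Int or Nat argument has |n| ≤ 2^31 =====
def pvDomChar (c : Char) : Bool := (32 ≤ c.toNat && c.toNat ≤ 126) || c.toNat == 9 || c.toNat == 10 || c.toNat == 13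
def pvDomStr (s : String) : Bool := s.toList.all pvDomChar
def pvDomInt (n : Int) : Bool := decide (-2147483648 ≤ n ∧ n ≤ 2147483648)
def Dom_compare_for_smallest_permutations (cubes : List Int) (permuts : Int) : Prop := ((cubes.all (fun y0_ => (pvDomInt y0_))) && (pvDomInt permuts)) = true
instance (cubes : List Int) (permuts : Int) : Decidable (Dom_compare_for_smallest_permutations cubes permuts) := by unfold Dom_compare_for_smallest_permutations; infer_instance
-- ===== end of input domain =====

-- B replaces A's per-element inner scan by a signature counter built in one pass
-- (asymptotically fewer signature comparisons); return values are proved equal.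

-- ===== PORT A =====
-- sorted(str(n)) — the digit signature both Pythons compute (A compares the char lists directly)
def pvSig (n : Int) : List Char := PySem.List.sorted (PySem.Int.toChars n) (fun c => c) false

-- inner loop of A: result_for_iter built over cubes_in_iter
def pvResForIter (i : Int) (cubes_in_iter : List Int) : List Int :=
  cubes_in_iter.foldl
    (fun acc j =>
      if pvSig j = pvSig i then
        (if acc.length = 0 then acc ++ [i] else acc) ++ [j]
      else acc) []

-- outer loop of A; `cubes` stays the full list (cubes.copy().remove(i));
-- `remove?` never raises here since i is drawn from cubes, so getD [] is exact
def pvLoopA (cubes : List Int) (permuts : Int) : List Int → List Int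
  | [] => []
  | i :: rest =>
      let cubes_in_iter := (PySem.List.remove? cubes i).getD []
      let result_for_iter := pvResForIter i cubes_in_iter
      if (result_for_iter.length : Int) = permuts then result_for_iter
      else pvLoopA cubes permuts rest

def compare_for_smallest_permutations (cubes : List Int) (permuts : Int) : List Int :=
  pvLoopA cubes permuts cubes

-- ===== PORT B =====
-- counts[k] = counts.get(k, 0) + 1 over all cubes (keys are the signature char
-- lists; Python joins them to a string only for hashability)
def pvCounts (cubes : List Int) : PySem.Dict (List Char) Int :=
  cubes.foldl (fun d c => d.insert (pvSig c) (d.getD (pvSig c) 0 + 1)) PySem.Dict.empty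

-- second loop of B: first i whose signature count equals permuts; counts[k]
-- never raises since every signature of an element of cubes is a key
def pvLoopB (counts : PySem.Dict (List Char) Int) (cubes : List Int) (permuts : Int) :
    List Int → List Int
  | [] => []
  | i :: rest =>
      if counts.getD (pvSig i) 0 = permuts then
        cubes.filter (fun j => pvSig j = pvSig i)
      else pvLoopB counts cubes permuts rest

def compare_for_smallest_permutations_alt (cubes : List Int) (permuts : Int) : List Int :=
  let counts := pvCounts cubes
  if permuts < 2 then []
  else pvLoopB counts cubes permuts cubes

-- ===== PRECONDITION & SPEC =====
def Spec_compare_for_smallest_permutations (cubes : List Int) (permuts : Int) (out : List Int) : Prop := out = compare_for_smallest_permutations_alt cubes permuts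
instance (cubes : List Int) (permuts : Int) (out : List Int) : Decidable (Spec_compare_for_smallest_permutations cubes permuts out) := by unfold Spec_compare_for_smallest_permutations; infer_instance

-- ===== CLAIM (what is proved, stated in full; the proofs are below) =====
def Claim_equal_compare_for_smallest_permutations : Prop := ∀ (cubes : List Int) (permuts : Int), Dom_compare_for_smallest_permutations cubes permuts → Spec_compare_for_smallest_permutations cubes permuts (compare_for_smallest_permutations cubes permuts)

-- ===== LEMMAS AND PROOFS =====

-- A's inner fold, from a nonempty accumulator, just appends the matches
theorem pvResFold_ne_nil (i : Int) (xs : List Int) : ∀ (acc : List Int), acc ≠ [] →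
    xs.foldl
      (fun acc j =>
        if pvSig j = pvSig i then
          (if acc.length = 0 then acc ++ [i] else acc) ++ [j]
        else acc) acc
    = acc ++ xs.filter (fun j => pvSig j = pvSig i) := by
  induction xs with
  | nil => intro acc h; simp
  | cons x t ih =>
    intro acc h
    rw [List.foldl_cons, List.filter_cons]
    by_cases hx : pvSig x = pvSig i
    · rw [if_pos hx, if_neg (by simp [h]), ih (acc ++ [x]) (by simp)]
      simp [hx]
    · rw [if_neg hx, ih acc h]
      simp [hx]

-- A's inner result: empty if no match, else i followed by all matches
theorem pvResForIter_eq (i : Int) (xs : List Int) :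
    pvResForIter i xs =
      if xs.filter (fun j => pvSig j = pvSig i) = [] then []
      else i :: xs.filter (fun j => pvSig j = pvSig i) := by
  unfold pvResForIter
  induction xs with
  | nil => simp
  | cons x t ih =>
    rw [List.foldl_cons, List.filter_cons]
    by_cases hx : pvSig x = pvSig i
    · rw [if_pos hx, if_pos (by simp), pvResFold_ne_nil i t ([] ++ [i] ++ [x]) (by simp)]
      simp [hx]
    · rw [if_neg hx, ih]
      simp [hx]

-- the counter agrees with the length of the signature group
theorem pvCounts_getD (cubes : List Int) (i : Int) :
    (pvCounts cubes).getD (pvSig i) 0 =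
      ((cubes.filter (fun j => pvSig j = pvSig i)).length : Int) := by
  unfold pvCounts
  rw [← List.foldl_map (f := pvSig)
      (g := fun (d : PySem.Dict (List Char) Int) x => d.insert x (d.getD x 0 + 1)),
    PySem.Dict.getD_foldl_insert_add_one, PySem.Dict.getD_empty]
  rw [show List.count (pvSig i) (cubes.map pvSig) = (cubes.map pvSig).count (pvSig i) from rfl,
    List.count_eq_countP, List.countP_map, ← List.countP_eq_length_filter]
  rw [show ((fun x => x == pvSig i) ∘ pvSig) = (fun j => decide (pvSig j = pvSig i)) from by
    funext a; exact Bool.beq_eq_decide_eq _ _]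
  simp

-- remove? skips a prefix none of whose elements share i's signature
theorem pvRemove_prefix (rest : List Int) (i : Int) : ∀ (pref : List Int),
    (∀ p ∈ pref, pvSig p ≠ pvSig i) →
    PySem.List.remove? (pref ++ i :: rest) i = some (pref ++ rest) := by
  intro pref
  induction pref with
  | nil => intro _; simp [PySem.List.remove?_cons_self]
  | cons p t ih =>
    intro h
    have hpi : p ≠ i := fun he => (h p (by simp)) (by rw [he])
    rw [List.cons_append, PySem.List.remove?_cons_of_ne _ hpi,
      ih (fun q hq => h q (by simp [hq]))]
    rfl

-- removing one signature-matching element shrinks the group by one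
theorem pvLenErase (cubes : List Int) (i : Int) (hi : i ∈ cubes) :
    (cubes.filter (fun j => pvSig j = pvSig i)).length
      = ((cubes.erase i).filter (fun j => pvSig j = pvSig i)).length + 1 := by
  have h := List.perm_cons_erase hi
  rw [(h.filter (fun j => decide (pvSig j = pvSig i))).length_eq]
  simp

-- degenerate permuts: A also returns []
theorem pvLoopA_small (cubes : List Int) (permuts : Int) (h2 : permuts < 2) :
    ∀ cs, pvLoopA cubes permuts cs = [] := by
  intro cs
  induction cs with
  | nil => rfl
  | cons i rest ih =>
    simp only [pvLoopA]
    by_cases hc :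
        ((pvResForIter i ((PySem.List.remove? cubes i).getD [])).length : Int) = permuts
    · rw [if_pos hc]
      rw [pvResForIter_eq] at hc ⊢
      by_cases hf : ((PySem.List.remove? cubes i).getD []).filter
          (fun j => pvSig j = pvSig i) = []
      · rw [if_pos hf]
      · rw [if_neg hf] at hc
        exfalso
        have h1 : 1 ≤ (((PySem.List.remove? cubes i).getD []).filter
            (fun j => pvSig j = pvSig i)).length := List.length_pos_iff.mpr hf
        simp only [List.length_cons] at hc
        omega
    · rw [if_neg hc]
      exact ih

-- main induction for permuts ≥ 2
theorem pvLoop_eq (cubes : List Int) (permuts : Int) (h2 : 2 ≤ permuts) :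
    ∀ cs pref, cubes = pref ++ cs →
      (∀ p ∈ pref, ((cubes.filter (fun j => pvSig j = pvSig p)).length : Int) ≠ permuts) →
      pvLoopA cubes permuts cs = pvLoopB (pvCounts cubes) cubes permuts cs := by
  intro cs
  induction cs with
  | nil => intro pref _ _; rfl
  | cons i cs' ih =>
    intro pref hsplit hpref
    simp only [pvLoopA, pvLoopB, pvCounts_getD]
    by_cases hc : ((cubes.filter (fun j => pvSig j = pvSig i)).length : Int) = permuts
    · -- the group of i is the answer: both loops stop here with the same list
      have hkey : ∀ p ∈ pref, pvSig p ≠ pvSig i := by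
        intro p hp he
        refine hpref p hp ?_
        rw [show (fun j => decide (pvSig j = pvSig p)) = (fun j => decide (pvSig j = pvSig i))
          from by funext j; rw [he]]
        exact hc
      have hrem : PySem.List.remove? cubes i = some (pref ++ cs') := by
        rw [hsplit]; exact pvRemove_prefix cs' i pref hkey
      have hfp : pref.filter (fun j => pvSig j = pvSig i) = [] :=
        List.filter_eq_nil_iff.mpr (fun p hp => by simpa using hkey p hp)
      have hfc : cubes.filter (fun j => pvSig j = pvSig i)
          = i :: cs'.filter (fun j => pvSig j = pvSig i) := by
        rw [hsplit, List.filter_append, hfp, List.nil_append, List.filter_cons]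
        simp
      have hne : cs'.filter (fun j => pvSig j = pvSig i) ≠ [] := by
        intro h0
        rw [hfc, h0] at hc
        simp at hc
        omega
      rw [hrem, Option.getD_some, pvResForIter_eq, List.filter_append, hfp, List.nil_append,
        if_neg hne, if_pos (by rw [← hfc]; exact hc), if_pos hc, hfc]
    · -- neither loop stops at i: A's result here has length 0 or the group size, both ≠ permuts
      have hi : i ∈ cubes := by rw [hsplit]; simp
      have hrem : PySem.List.remove? cubes i = some (cubes.erase i) :=
        PySem.List.remove?_eq_some_erase cubes i hi
      have hA : ¬ (((pvResForIter i ((PySem.List.remove? cubes i).getD [])).length : Int)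
          = permuts) := by
        rw [hrem, Option.getD_some, pvResForIter_eq]
        by_cases hf : (cubes.erase i).filter (fun j => pvSig j = pvSig i) = []
        · rw [if_pos hf]
          simp only [List.length_nil]
          omega
        · rw [if_neg hf]
          intro h0
          refine hc ?_
          rw [pvLenErase cubes i hi]
          simpa using h0
      rw [if_neg hA, if_neg hc]
      refine ih (pref ++ [i]) (by rw [hsplit]; simp) ?_
      intro p hp
      rcases List.mem_append.mp hp with hp1 | hp2
      · exact hpref p hp1
      · have : p = i := by simpa using hp2
        subst this
        exact hc

-- ===== VERDICT (by name: the statement is the Claim_ definition above) =====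
theorem compare_for_smallest_permutations_spec : Claim_equal_compare_for_smallest_permutations := by
  intro cubes permuts _
  unfold Spec_compare_for_smallest_permutations compare_for_smallest_permutations
    compare_for_smallest_permutations_alt
  by_cases h2 : permuts < 2
  · simp only [h2, if_true]
    exact pvLoopA_small cubes permuts h2 cubes
  · simp only [h2, if_false]
    exact pvLoop_eq cubes permuts (by omega) cubes [] rfl (by simp)
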